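-- pv_equiv track=rewrite | github.com/fabianpradod/proyecto2-cyk | cnf.py | _eliminate_unit_productions
-- ===== SOURCE A (Python) =====
-- from collections import defaultdict, deque
-- from typing import DefaultDict, Dict, Iterable, List, Set, Tuple
--
-- Symbol = str
--
-- ProductionRHS = Tuple[Symbol, ...]
--
-- def _eliminate_unit_productions(
--     productions: Dict[Symbol, Set[ProductionRHS]]
-- ) -> Dict[Symbol, Set[ProductionRHS]]:
--     """
--     Replace unit productions A -> B with direct copies of B's non-unit productions
--     """
--
--     nonterminals = set(productions)
--
--     # non_unit stores the productions that are already acceptable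
--     # unit_graph records each A -> B unit edge so we can follow chains (A -> B -> C)
--     non_unit: Dict[Symbol, Set[ProductionRHS]] = {
--         lhs: set() for lhs in productions
--     }
--     unit_graph: Dict[Symbol, Set[Symbol]] = {lhs: set() for lhs in productions}
--
--     for lhs, rhs_set in productions.items():
--         for rhs in rhs_set:
--             if len(rhs) == 1 and rhs[0] in nonterminals:
--                 unit_graph[lhs].add(rhs[0])
--             else:
--                 non_unit[lhs].add(rhs)
--
--     # Compute the closure of the unit graph using a BFS from each non-terminal
--     result: Dict[Symbol, Set[ProductionRHS]] = {
--         lhs: set(non_unit[lhs]) for lhs in productions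
--     }
--
--     for origin in productions:
--         queue: deque[Symbol] = deque(unit_graph[origin])
--         visited: Set[Symbol] = set(unit_graph[origin])
--
--         while queue:
--             target = queue.popleft()
--             # Copy all non-unit productions from the target into the origin
--             result[origin].update(non_unit[target])
--
--             for next_symbol in unit_graph[target]:
--                 if next_symbol not in visited:
--                     visited.add(next_symbol)
--                     queue.append(next_symbol)
--
--     return result
-- ===== SOURCE B (Python) =====
-- def _eliminate_unit_productions(productions):
--     """
--     Dataflow formulation: no queue, no visited set, no per-origin traversal.
--     Partition each rule set once, then saturate each symbol's unit-reachability
--     set by Bellman-Ford-style relaxation rounds (at most len(productions) of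
--     them, stopping early at a fixed point), and emit one union per symbol.
--     """
--     nonterminals = set(productions)
--     kept = {lhs: {rhs for rhs in rhss if len(rhs) != 1 or rhs[0] not in nonterminals}
--             for lhs, rhss in productions.items()}
--     unit = {lhs: {rhs[0] for rhs in rhss if len(rhs) == 1 and rhs[0] in nonterminals}
--             for lhs, rhss in productions.items()}
--
--     rounds = len(productions)
--
--     def closure(lhs):
--         r = set(unit[lhs])
--         for _ in range(rounds):
--             before = len(r)
--             for t in list(r):
--                 r = r | unit[t]
--             if len(r) == before:
--                 break
--         return r
--
--     return {lhs: kept[lhs].union(*(kept[t] for t in closure(lhs)))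
--             for lhs in productions}
-- ===== Notes on version B (the rewrite author's own statement) =====
-- stated objective: alternative
-- what changed: B drops A's per-origin queue-and-visited BFS entirely: it partitions the rules by comprehension and computes each symbol's unit-reachability as a Kleene/Bellman-Ford fixed point - at most len(productions) relaxation rounds, each replacing the reach set by the union of its members' unit successors, stopping when a round adds nothing - then emits one union of kept productions per symbol.
import Mathlib
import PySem

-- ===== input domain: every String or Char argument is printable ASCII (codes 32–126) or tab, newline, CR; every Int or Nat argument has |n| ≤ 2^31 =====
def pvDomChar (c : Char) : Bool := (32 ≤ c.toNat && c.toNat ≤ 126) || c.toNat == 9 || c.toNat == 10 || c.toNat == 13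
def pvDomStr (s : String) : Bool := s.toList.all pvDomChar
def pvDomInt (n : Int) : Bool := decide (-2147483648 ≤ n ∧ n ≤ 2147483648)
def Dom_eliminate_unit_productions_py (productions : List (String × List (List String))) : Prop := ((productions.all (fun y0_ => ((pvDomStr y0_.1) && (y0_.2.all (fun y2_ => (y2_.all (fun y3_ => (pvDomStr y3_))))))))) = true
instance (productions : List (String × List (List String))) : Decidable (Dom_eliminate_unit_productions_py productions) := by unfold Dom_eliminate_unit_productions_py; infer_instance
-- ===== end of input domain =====

-- B drops A's per-origin queue-and-visited BFS: it partitions the rules by comprehension and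
-- saturates each symbol's unit-reachability set by Bellman-Ford-style relaxation rounds (at most
-- len(productions), with early exit at the fixed point), then emits one union per symbol
-- (objective: alternative).


-- ---- termination helpers (used by port A's BFS loop via `decreasing_by`) ----

/-- Elements of `l` not yet in `v`, in first-occurrence order (what one pass of
`if s not in visited: visited.add(s); queue.append(s)` appends). -/
def pvNew (v l : List String) : List String :=
  match l with
  | [] => []
  | s :: l => if s ∈ v then pvNew v l else s :: pvNew (v ++ [s]) l

theorem pvNew_mem {v l : List String} {x : String} (hx : x ∈ pvNew v l) : x ∈ l ∧ ¬ x ∈ v := by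
  induction l generalizing v with
  | nil => simp [pvNew] at hx
  | cons s l ih =>
    simp only [pvNew] at hx
    split at hx
    · have := ih hx; exact ⟨List.mem_cons_of_mem _ this.1, this.2⟩
    · rcases List.mem_cons.mp hx with h | h
      · subst h; simp_all
      · have := ih h
        refine ⟨List.mem_cons_of_mem _ this.1, fun hv => this.2 (by simp [hv])⟩

theorem pvNew_nodup (v l : List String) : (pvNew v l).Nodup := by
  induction l generalizing v with
  | nil => simp [pvNew]
  | cons s l ih =>
    simp only [pvNew]
    split
    · exact ih v
    · refine List.nodup_cons.mpr ⟨fun hs => ?_, ih (v ++ [s])⟩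
      have := pvNew_mem hs
      simp at this

/-- One inner pass of A's BFS loop (scan successors, append the unseen ones), characterised. -/
theorem pvStep_spec (l v q : List String) :
    l.foldl (fun (vq : PySem.Set String × List String) s =>
      if PySem.Set.contains vq.1 s then vq else (PySem.Set.add vq.1 s, vq.2 ++ [s])) (v, q)
    = (v ++ pvNew v l, q ++ pvNew v l) := by
  induction l generalizing v q with
  | nil => simp [pvNew]
  | cons s l ih =>
    simp only [PySem.Set.contains, PySem.Set.add, List.contains_iff_mem] at ih ⊢
    simp only [List.foldl_cons, pvNew]
    by_cases hs : s ∈ v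
    · simp only [if_pos hs, ih]
    · simp only [if_neg hs, ih]
      simp [List.append_assoc]

/-- Universe of symbols a traversal over `ug` can ever discover. -/
def pvU (ug : PySem.Dict String (PySem.Set String)) : List String :=
  PySem.Set.ofList (ug.items.flatMap (fun p => p.2))

theorem pvGetD_subset_U (ug : PySem.Dict String (PySem.Set String)) (t : String) :
    ∀ x ∈ ug.getD t PySem.Set.empty, x ∈ pvU ug := by
  intro x hx
  simp only [pvU, PySem.Set.mem_ofList, List.mem_flatMap]
  unfold PySem.Dict.getD PySem.Dict.get? at hx
  cases hfind : ug.items.find? (fun p => p.1 == t) with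
  | none => simp [hfind, PySem.Set.empty] at hx
  | some p =>
    simp [hfind] at hx
    exact ⟨p, List.mem_of_find?_eq_some hfind, hx⟩

/-- BFS potential: queue length plus undiscovered universe. -/
def pvPot (ug : PySem.Dict String (PySem.Set String)) (q v : List String) : Nat :=
  q.length + ((pvU ug).filter (fun x => !(v.contains x))).length

theorem pvNodup_subset_length {l l' : List String} (h : l.Nodup) (hs : l ⊆ l') :
    l.length ≤ l'.length := by
  have := List.toFinset_card_le l'
  have h2 : l.toFinset ⊆ l'.toFinset := by intro x hx; simp at hx ⊢; exact hs hx
  have h3 := Finset.card_le_card h2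
  rw [List.toFinset_card_of_nodup h] at h3
  omega

theorem pvPot_filter_le (U v d : List String) (hU : U.Nodup) (hd : d.Nodup)
    (hmem : ∀ x ∈ d, x ∈ U ∧ ¬ x ∈ v) :
    (U.filter (fun x => !((v ++ d).contains x))).length + d.length
      ≤ (U.filter (fun x => !(v.contains x))).length := by
  have hBnd : (U.filter (fun x => !((v ++ d).contains x))).Nodup := hU.filter _
  have hBd : ((U.filter (fun x => !((v ++ d).contains x))) ++ d).Nodup := by
    refine List.Nodup.append hBnd hd ?_
    intro x hx hx'
    simp [List.mem_filter] at hx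
    exact hx.2.2 hx'
  have hsub : ((U.filter (fun x => !((v ++ d).contains x))) ++ d)
      ⊆ U.filter (fun x => !(v.contains x)) := by
    intro x hx
    rcases List.mem_append.mp hx with h | h
    · simp [List.mem_filter] at h ⊢; exact ⟨h.1, h.2.1⟩
    · simp [List.mem_filter]; exact ⟨(hmem x h).1, (hmem x h).2⟩
  have := pvNodup_subset_length hBd hsub
  simpa using this

theorem pvPotA_step (ug : PySem.Dict String (PySem.Set String)) (t : String) (q' v : List String) :
    pvPot ug (q' ++ pvNew v (ug.getD t PySem.Set.empty)) (v ++ pvNew v (ug.getD t PySem.Set.empty))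
      < pvPot ug (t :: q') v := by
  have hle := pvPot_filter_le (pvU ug) v (pvNew v (ug.getD t PySem.Set.empty))
    (PySem.Set.nodup_ofList _) (pvNew_nodup _ _)
    (fun x hx => ⟨pvGetD_subset_U ug t x (pvNew_mem hx).1, (pvNew_mem hx).2⟩)
  simp only [pvPot, List.length_append, List.length_cons]
  omega

-- ===== PORT A =====

/-- The two dict-building loops of A: `non_unit` and `unit_graph`, pre-initialised with empty
sets for every key, then filled by one pass over `productions.items()`. -/
def pvA_build (nts : PySem.Set String) (P : List (String × List (List String))) :
    PySem.Dict String (PySem.Set (List String)) × PySem.Dict String (PySem.Set String) :=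
  let nu0 : PySem.Dict String (PySem.Set (List String)) :=
    P.foldl (fun d p => d.insert p.1 PySem.Set.empty) (PySem.Dict.mk [])
  let ug0 : PySem.Dict String (PySem.Set String) :=
    P.foldl (fun d p => d.insert p.1 PySem.Set.empty) (PySem.Dict.mk [])
  P.foldl (fun st p =>
    p.2.foldl (fun st rhs =>
      if PySem.List.len rhs == 1 && PySem.Set.contains nts (PySem.List.pyGetD rhs 0 "") then
        (st.1, st.2.modify p.1 PySem.Set.empty (fun s => PySem.Set.add s (PySem.List.pyGetD rhs 0 "")))
      else
        (st.1.modify p.1 PySem.Set.empty (fun s => PySem.Set.add s rhs), st.2)) st)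
    (nu0, ug0)

/-- A's `while queue:` loop for one origin, acting on that origin's result set. -/
def pvA_bfs (ug : PySem.Dict String (PySem.Set String)) (nu : PySem.Dict String (PySem.Set (List String)))
    (q v : List String) (r : PySem.Set (List String)) : PySem.Set (List String) :=
  match q with
  | [] => r
  | t :: q' =>
    let r' := PySem.Set.update r (nu.getD t PySem.Set.empty)
    let vq := (ug.getD t PySem.Set.empty).foldl
      (fun (vq : PySem.Set String × List String) s =>
        if PySem.Set.contains vq.1 s then vq else (PySem.Set.add vq.1 s, vq.2 ++ [s])) (v, q')
    pvA_bfs ug nu vq.2 vq.1 r'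
termination_by pvPot ug q v
decreasing_by
  simp only [dite_eq_ite]
  rw [pvStep_spec]
  exact pvPotA_step ug t q' v

def eliminate_unit_productions_py (productions : List (String × List (List String))) : List (String × List (List String)) :=
  let nts := PySem.Set.ofList (productions.map (fun p => p.1))
  let bu := pvA_build nts productions
  let nu := bu.1
  let ug := bu.2
  let res0 := productions.foldl
    (fun d p => d.insert p.1 (PySem.Set.ofList (nu.getD p.1 PySem.Set.empty))) (PySem.Dict.mk [])
  let res := productions.foldl (fun d p =>
      d.insert p.1 (pvA_bfs ug nu (ug.getD p.1 PySem.Set.empty)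
        (PySem.Set.ofList (ug.getD p.1 PySem.Set.empty)) (d.getD p.1 PySem.Set.empty))) res0
  res.items

-- ===== PORT B =====

/-- B's unit-production test (inline comprehension condition in Source B). -/
def pvB_isUnit (nts : PySem.Set String) (rhs : List String) : Bool :=
  PySem.List.len rhs == 1 && PySem.Set.contains nts (PySem.List.pyGetD rhs 0 "")

/-- B's `closure` saturation loop: `rounds` relaxation rounds; each round replaces `r` by its
union with every member's unit successors, stopping early when a round adds nothing. -/
def pvSat (ug : PySem.Dict String (PySem.Set String)) : Nat → List String → List String
  | 0, r => r
  | n + 1, r =>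
    let r' := r.foldl (fun a t => PySem.Set.update a (ug.getD t PySem.Set.empty)) r
    if r'.length = r.length then r' else pvSat ug n r'

def eliminate_unit_productions_py_alt (productions : List (String × List (List String))) : List (String × List (List String)) :=
  let nts := PySem.Set.ofList (productions.map (fun p => p.1))
  let kept : PySem.Dict String (PySem.Set (List String)) :=
    PySem.Dict.mk (productions.map (fun p =>
      (p.1, PySem.Set.ofList (p.2.filter (fun rhs => !pvB_isUnit nts rhs)))))
  let unit : PySem.Dict String (PySem.Set String) :=
    PySem.Dict.mk (productions.map (fun p =>
      (p.1, PySem.Set.ofList ((p.2.filter (pvB_isUnit nts)).map (fun rhs => PySem.List.pyGetD rhs 0 "")))))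
  let rounds := productions.length
  productions.map (fun p => (p.1,
    PySem.Set.union (kept.getD p.1 PySem.Set.empty)
      ((pvSat unit rounds (PySem.Set.ofList (unit.getD p.1 PySem.Set.empty))).flatMap
        (fun t => kept.getD t PySem.Set.empty))))

-- ===== PRECONDITION & SPEC =====
-- Pre_ excludes association lists with duplicate keys: such lists cannot represent a Python
-- dict (dict keys are unique), so they model no input the Python function can receive.
def Pre_eliminate_unit_productions_py (productions : List (String × List (List String))) : Prop :=
  (productions.map (fun p => p.1)).Nodup
instance (productions : List (String × List (List String))) : Decidable (Pre_eliminate_unit_productions_py productions) := by unfold Pre_eliminate_unit_productions_py; infer_instance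

def pvWitness_eliminate_unit_productions_py : (List (String × List (List String))) :=
  [("S", [["A"], ["a", "b"]]), ("A", [["a"]])]

def Spec_eliminate_unit_productions_py (productions : List (String × List (List String))) (out : List (String × List (List String))) : Prop := out = eliminate_unit_productions_py_alt productions
instance (productions : List (String × List (List String))) (out : List (String × List (List String))) : Decidable (Spec_eliminate_unit_productions_py productions out) := by unfold Spec_eliminate_unit_productions_py; infer_instance

-- ===== CLAIM (what is proved, stated in full; the proofs are below) =====
def Claim_equal_eliminate_unit_productions_py : Prop := ∀ (productions : List (String × List (List String))), Dom_eliminate_unit_productions_py productions → Pre_eliminate_unit_productions_py productions → Spec_eliminate_unit_productions_py productions (eliminate_unit_productions_py productions)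

-- ===== LEMMAS AND PROOFS =====

/-- A's BFS visit order (pop order of the deque), extracted from `pvA_bfs`. -/
def pvAvis (ug : PySem.Dict String (PySem.Set String)) (q v : List String) : List String :=
  match q with
  | [] => []
  | t :: q' =>
    let d := pvNew v (ug.getD t PySem.Set.empty)
    t :: pvAvis ug (q' ++ d) (v ++ d)
termination_by pvPot ug q v
decreasing_by exact pvPotA_step ug t q' v

theorem pvAvis_nil (ug : PySem.Dict String (PySem.Set String)) (v : List String) :
    pvAvis ug [] v = [] := by rw [pvAvis]

theorem pvA_bfs_eq (ug : PySem.Dict String (PySem.Set String))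
    (nu : PySem.Dict String (PySem.Set (List String))) (q v : List String)
    (r : PySem.Set (List String)) :
    pvA_bfs ug nu q v r
      = PySem.Set.update r ((pvAvis ug q v).flatMap (fun t => nu.getD t PySem.Set.empty)) := by
  fun_induction pvA_bfs ug nu q v r with
  | case1 => simp [pvAvis]
  | case2 =>
    rename_i v r t q' r' vq ih
    rw [ih]
    have hvq : vq = (v ++ pvNew v (ug.getD t PySem.Set.empty),
        q' ++ pvNew v (ug.getD t PySem.Set.empty)) := pvStep_spec _ _ _
    rw [hvq]
    conv_rhs => rw [pvAvis]
    simp only [List.flatMap_cons, PySem.Set.update, List.foldl_append]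
    rfl

theorem pvAvis_congr (ug1 ug2 : PySem.Dict String (PySem.Set String)) (q v : List String)
    (h : ∀ t, ug1.getD t PySem.Set.empty = ug2.getD t PySem.Set.empty) :
    pvAvis ug1 q v = pvAvis ug2 q v := by
  fun_induction pvAvis ug1 q v with
  | case1 => rw [pvAvis]
  | case2 =>
    rename_i v t q' d ih
    conv_rhs => rw [pvAvis]
    simp only [← h t, ih]
    rfl

/-- All new symbols discovered while scanning the list `f` of frontier nodes one by one. -/
def pvCollect (ug : PySem.Dict String (PySem.Set String)) (v f : List String) : List String × List String :=
  match f with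
  | [] => (v, [])
  | t :: f =>
    let d := pvNew v (ug.getD t PySem.Set.empty)
    let r := pvCollect ug (v ++ d) f
    (r.1, d ++ r.2)

theorem pvCollect_mem (ug : PySem.Dict String (PySem.Set String)) (v f : List String) :
    ∀ x ∈ (pvCollect ug v f).2, x ∈ pvU ug ∧ ¬ x ∈ v := by
  induction f generalizing v with
  | nil => simp [pvCollect]
  | cons t f ih =>
    intro x hx
    simp only [pvCollect, List.mem_append] at hx
    rcases hx with h | h
    · exact ⟨pvGetD_subset_U ug t x (pvNew_mem h).1, (pvNew_mem h).2⟩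
    · have := ih (v ++ pvNew v (ug.getD t PySem.Set.empty)) x h
      exact ⟨this.1, fun hv => this.2 (by simp [hv])⟩

theorem pvCollect_nodup (ug : PySem.Dict String (PySem.Set String)) (v f : List String) :
    (pvCollect ug v f).2.Nodup := by
  induction f generalizing v with
  | nil => simp [pvCollect]
  | cons t f ih =>
    simp only [pvCollect]
    refine List.Nodup.append (pvNew_nodup _ _) (ih _) ?_
    intro x hx hx'
    have := pvCollect_mem ug _ f x hx'
    exact this.2 (List.mem_append.mpr (Or.inr hx))

theorem pvAvis_unroll (ug : PySem.Dict String (PySem.Set String)) (f : List String) :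
    ∀ q2 v, pvAvis ug (f ++ q2) v
      = f ++ pvAvis ug (q2 ++ (pvCollect ug v f).2) (v ++ (pvCollect ug v f).2) := by
  induction f with
  | nil => intro q2 v; simp [pvCollect]
  | cons t f ih =>
    intro q2 v
    rw [List.cons_append, pvAvis]
    simp only [pvCollect]
    rw [List.append_assoc f q2, ih (q2 ++ pvNew v (ug.getD t PySem.Set.empty)) _]
    simp [List.append_assoc]

-- ---- B's saturation loop, related to A's BFS visit order ----

theorem pvNew_nil_of_subset {v l : List String} (h : ∀ x ∈ l, x ∈ v) : pvNew v l = [] := by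
  induction l with
  | nil => rfl
  | cons s l ih =>
    simp only [pvNew, if_pos (h s (by simp))]
    exact ih (fun x hx => h x (by simp [hx]))

theorem pvNew_append (v l1 l2 : List String) :
    pvNew v (l1 ++ l2) = pvNew v l1 ++ pvNew (v ++ pvNew v l1) l2 := by
  induction l1 generalizing v with
  | nil => simp [pvNew]
  | cons s l1 ih =>
    simp only [List.cons_append, pvNew]
    by_cases hs : s ∈ v
    · simp only [if_pos hs]; exact ih v
    · simp only [if_neg hs, ih (v ++ [s])]
      simp [List.append_assoc]

theorem pvNew_complete {v l : List String} {x : String} (hx : x ∈ l) :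
    x ∈ v ∨ x ∈ pvNew v l := by
  induction l generalizing v with
  | nil => simp at hx
  | cons s l ih =>
    simp only [pvNew]
    by_cases hs : s ∈ v
    · rw [if_pos hs]
      rcases List.mem_cons.mp hx with h | h
      · exact Or.inl (h ▸ hs)
      · exact ih h
    · rw [if_neg hs]
      rcases List.mem_cons.mp hx with h | h
      · exact Or.inr (by simp [h])
      · rcases ih (v := v ++ [s]) h with h2 | h2
        · rcases List.mem_append.mp h2 with h3 | h3
          · exact Or.inl h3
          · exact Or.inr (by simp at h3; simp [h3])
        · exact Or.inr (by simp [h2])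

theorem pvUpdate_eq (v l : List String) : PySem.Set.update v l = v ++ pvNew v l := by
  induction l generalizing v with
  | nil => simp [pvNew, PySem.Set.update]
  | cons s l ih =>
    rw [PySem.Set.update_cons]
    by_cases hs : s ∈ v
    · rw [PySem.Set.add_of_mem hs, ih]
      simp [pvNew, hs]
    · rw [PySem.Set.add_of_not_mem hs, ih]
      simp [pvNew, hs, List.append_assoc]

theorem pvFoldUpdate (ug : PySem.Dict String (PySem.Set String)) (l : List String) :
    ∀ v : List String,
    l.foldl (fun a t => PySem.Set.update a (ug.getD t PySem.Set.empty)) v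
      = v ++ pvNew v (l.flatMap (fun t => ug.getD t PySem.Set.empty)) := by
  induction l with
  | nil => intro v; simp [pvNew]
  | cons t l ih =>
    intro v
    rw [List.foldl_cons, pvUpdate_eq, ih, List.flatMap_cons, pvNew_append]
    simp [List.append_assoc]

theorem pvCollect_snd (ug : PySem.Dict String (PySem.Set String)) (f : List String) :
    ∀ v, (pvCollect ug v f).2 = pvNew v (f.flatMap (fun t => ug.getD t PySem.Set.empty)) := by
  induction f with
  | nil => intro v; simp [pvCollect, pvNew]
  | cons t f ih =>
    intro v
    simp only [pvCollect, List.flatMap_cons, pvNew_append]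
    rw [ih]

/-- One full round of B's saturation over a closed prefix `p` plus frontier `f`
adds exactly the unseen successors of the frontier. -/
theorem pvRoundD (ug : PySem.Dict String (PySem.Set String)) (p f : List String)
    (hclo : ∀ t ∈ p, ∀ s ∈ ug.getD t PySem.Set.empty, s ∈ p ++ f) :
    (p ++ f).foldl (fun a t => PySem.Set.update a (ug.getD t PySem.Set.empty)) (p ++ f)
      = (p ++ f) ++ (pvCollect ug (p ++ f) f).2 := by
  rw [pvFoldUpdate, pvCollect_snd, List.flatMap_append, pvNew_append,
    pvNew_nil_of_subset (by
      intro s hs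
      rcases List.mem_flatMap.mp hs with ⟨t, ht, hst⟩
      exact hclo t ht s hst)]
  simp

theorem pvAvisD (ug : PySem.Dict String (PySem.Set String)) (p f : List String) :
    pvAvis ug f (p ++ f)
      = f ++ pvAvis ug (pvCollect ug (p ++ f) f).2 ((p ++ f) ++ (pvCollect ug (p ++ f) f).2) := by
  have h := pvAvis_unroll ug f [] (p ++ f)
  simpa using h

/-- MAIN: B's bounded saturation from a closed prefix `p` plus frontier `f` yields
exactly `p` followed by A's BFS visit order from `f`. -/
theorem pvSat_eq_avis (ug : PySem.Dict String (PySem.Set String)) :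
    ∀ (n : Nat) (p f : List String),
    ((pvU ug).filter (fun x => !((p ++ f).contains x))).length ≤ n →
    (p ++ f).Nodup →
    (∀ t ∈ p, ∀ s ∈ ug.getD t PySem.Set.empty, s ∈ p ++ f) →
    pvSat ug n (p ++ f) = p ++ pvAvis ug f (p ++ f) := by
  intro n
  induction n with
  | zero =>
    intro p f hb hnd hclo
    have hfe : (pvU ug).filter (fun x => !((p ++ f).contains x)) = [] :=
      List.eq_nil_of_length_eq_zero (Nat.le_zero.mp hb)
    have hd : (pvCollect ug (p ++ f) f).2 = [] := by
      cases hde : (pvCollect ug (p ++ f) f).2 with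
      | nil => rfl
      | cons a d' =>
        exfalso
        have hm := pvCollect_mem ug (p ++ f) f a (by rw [hde]; simp)
        have ha : a ∈ (pvU ug).filter (fun x => !((p ++ f).contains x)) := by
          have hm2 := hm.2
          simp only [List.mem_append, not_or] at hm2
          simp [List.mem_filter, hm.1, hm2.1, hm2.2]
        rw [hfe] at ha
        simp at ha
    rw [pvAvisD, hd, pvAvis_nil]
    simp [pvSat]
  | succ n ih =>
    intro p f hb hnd hclo
    have hfold := pvRoundD ug p f hclo
    show (let r' := (p ++ f).foldl (fun a t => PySem.Set.update a (ug.getD t PySem.Set.empty)) (p ++ f);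
      if r'.length = (p ++ f).length then r' else pvSat ug n r') = p ++ pvAvis ug f (p ++ f)
    rw [hfold]
    by_cases hd : (pvCollect ug (p ++ f) f).2 = []
    · rw [hd, List.append_nil, if_pos rfl, pvAvisD, hd, pvAvis_nil]
      simp
    · have hdl : (pvCollect ug (p ++ f) f).2.length ≠ 0 :=
        fun h => hd (List.eq_nil_of_length_eq_zero h)
      rw [if_neg (by simp only [List.length_append]; omega)]
      have hb' : ((pvU ug).filter
          (fun x => !(((p ++ f) ++ (pvCollect ug (p ++ f) f).2).contains x))).length ≤ n := by
        have := pvPot_filter_le (pvU ug) (p ++ f) (pvCollect ug (p ++ f) f).2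
          (PySem.Set.nodup_ofList _) (pvCollect_nodup ug (p ++ f) f) (pvCollect_mem ug (p ++ f) f)
        omega
      have hnd' : ((p ++ f) ++ (pvCollect ug (p ++ f) f).2).Nodup := by
        refine List.Nodup.append hnd (pvCollect_nodup ug (p ++ f) f) ?_
        intro x hx hx'
        exact (pvCollect_mem ug (p ++ f) f x hx').2 hx
      have hclo' : ∀ t ∈ p ++ f, ∀ s ∈ ug.getD t PySem.Set.empty,
          s ∈ (p ++ f) ++ (pvCollect ug (p ++ f) f).2 := by
        intro t ht s hs
        rcases List.mem_append.mp ht with h | h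
        · exact List.mem_append_left _ (hclo t h s hs)
        · have hsl : s ∈ f.flatMap (fun t => ug.getD t PySem.Set.empty) :=
            List.mem_flatMap.mpr ⟨t, h, hs⟩
          rcases pvNew_complete (v := p ++ f) hsl with h2 | h2
          · exact List.mem_append_left _ h2
          · refine List.mem_append_right _ ?_
            rw [pvCollect_snd]
            exact h2
      have := ih (p ++ f) (pvCollect ug (p ++ f) f).2 hb' hnd' hclo'
      rw [pvAvisD, this]
      simp [List.append_assoc]

theorem pvFilter_bound (ug : PySem.Dict String (PySem.Set String))
    (P : List (String × List (List String))) (v : List String)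
    (h : ∀ x ∈ pvU ug, x ∈ P.map (fun p => p.1)) :
    ((pvU ug).filter (fun x => !(v.contains x))).length ≤ P.length := by
  have h1 : ((pvU ug).filter (fun x => !(v.contains x))).length ≤ (pvU ug).length :=
    List.length_filter_le _ _
  have h2 : (pvU ug).length ≤ (P.map (fun p => p.1)).length :=
    pvNodup_subset_length (PySem.Set.nodup_ofList _) h
  simp only [List.length_map] at h2
  omega

/-- Every unit-edge target in B's unit graph is a key of `P`. -/
theorem pvUB_subset (P : List (String × List (List String))) :
    ∀ x ∈ pvU (PySem.Dict.mk (P.map (fun p =>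
      (p.1, PySem.Set.ofList ((p.2.filter (pvB_isUnit (PySem.Set.ofList (P.map (fun p => p.1))))).map
        (fun rhs => PySem.List.pyGetD rhs 0 "")))))), x ∈ P.map (fun p => p.1) := by
  intro x hx
  simp only [pvU, PySem.Set.mem_ofList, List.mem_flatMap] at hx
  obtain ⟨q, hq, hxq⟩ := hx
  have hq' : q ∈ P.map (fun p =>
      (p.1, PySem.Set.ofList ((p.2.filter (pvB_isUnit (PySem.Set.ofList (P.map (fun p => p.1))))).map
        (fun rhs => PySem.List.pyGetD rhs 0 "")))) := hq
  obtain ⟨p, hp, rfl⟩ := List.mem_map.mp hq'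
  simp only [PySem.Set.mem_ofList, List.mem_map, List.mem_filter] at hxq
  obtain ⟨rhs, ⟨_, hu⟩, rfl⟩ := hxq
  have := (Bool.and_eq_true _ _).mp hu
  have hc := this.2
  rw [PySem.Set.contains_eq_listContains] at hc
  simp only [List.contains_iff_mem, decide_eq_true_eq] at hc
  simpa [PySem.Set.mem_ofList] using hc

-- ---- dict bookkeeping shared by both ports ----

/-- First-match lookup in the input association list. -/
def pvLk (P : List (String × List (List String))) (k : String) : List (List String) :=
  (PySem.Dict.mk P).getD k []

/-- The non-unit production set of `k`, as both versions compute it. -/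
def pvNUf (nts : PySem.Set String) (P : List (String × List (List String))) (k : String) :
    PySem.Set (List String) :=
  PySem.Set.ofList ((pvLk P k).filter (fun rhs => !pvB_isUnit nts rhs))

/-- The unit-edge target set of `k`, as both versions compute it. -/
def pvUGf (nts : PySem.Set String) (P : List (String × List (List String))) (k : String) :
    PySem.Set String :=
  PySem.Set.ofList (((pvLk P k).filter (pvB_isUnit nts)).map (fun rhs => PySem.List.pyGetD rhs 0 ""))

theorem pvMk_get?_none {ν : Type} (P : List (String × ν)) (k : String)
    (h : ¬ k ∈ P.map (fun p => p.1)) : (PySem.Dict.mk P).get? k = none := by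
  unfold PySem.Dict.get?
  rw [List.find?_eq_none.mpr]
  · rfl
  · intro p hp
    simp only [beq_iff_eq]
    intro he
    exact h (List.mem_map.mpr ⟨p, hp, he⟩)

theorem pvMap_get? {ν : Type} (P : List (String × List (List String)))
    (G : String → List (List String) → ν) (k : String) :
    (PySem.Dict.mk (P.map (fun p => (p.1, G p.1 p.2)))).get? k
      = ((PySem.Dict.mk P).get? k).map (G k) := by
  induction P with
  | nil => rfl
  | cons p P ih =>
    by_cases h : p.1 = k
    · simp [PySem.Dict.get?, List.find?_cons, h]
    · have hb : (p.1 == k) = false := by simp [h]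
      simpa [PySem.Dict.get?, List.find?_cons, hb] using ih

theorem pvFoldInsC_get? {ν : Type} (z : ν) (P : List (String × List (List String))) :
    ∀ (d : PySem.Dict String ν) (k : String),
    (P.foldl (fun d p => d.insert p.1 z) d).get? k
      = if k ∈ P.map (fun p => p.1) then some z else d.get? k := by
  induction P with
  | nil => intro d k; simp
  | cons p P ih =>
    intro d k
    rw [List.foldl_cons, ih]
    by_cases hk : k ∈ P.map (fun p => p.1)
    · simp [hk]
    · by_cases he : k = p.1
      · subst he
        simp [hk, PySem.Dict.get?_insert_self]
      · simp [hk, he, PySem.Dict.get?_insert_of_ne d z he]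

/-- Generic second-pass fold: each step overwrites only its own key. -/
theorem pvFoldIns_get?_notmem {ν : Type} (G : String → ν → ν) (z : ν)
    (P : List (String × List (List String))) :
    ∀ (d : PySem.Dict String ν) (k : String), ¬ k ∈ P.map (fun p => p.1) →
    (P.foldl (fun d p => d.insert p.1 (G p.1 (d.getD p.1 z))) d).get? k = d.get? k := by
  induction P with
  | nil => intro d k _; rfl
  | cons p P ih =>
    intro d k hk
    simp only [List.map_cons, List.mem_cons] at hk
    push_neg at hk
    rw [List.foldl_cons, ih _ k hk.2, PySem.Dict.get?_insert_of_ne _ _ hk.1]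

theorem pvFoldIns_get? {ν : Type} (G : String → ν → ν) (z : ν)
    (P : List (String × List (List String))) :
    ∀ (d : PySem.Dict String ν) (k : String), (P.map (fun p => p.1)).Nodup →
    k ∈ P.map (fun p => p.1) →
    (P.foldl (fun d p => d.insert p.1 (G p.1 (d.getD p.1 z))) d).get? k
      = some (G k (d.getD k z)) := by
  induction P with
  | nil => intro d k _ hk; simp at hk
  | cons p P ih =>
    intro d k hnd hk
    simp only [List.map_cons, List.nodup_cons] at hnd
    rw [List.foldl_cons]
    by_cases he : k = p.1
    · subst he
      rw [pvFoldIns_get?_notmem G z P _ p.1 hnd.1]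
      rw [PySem.Dict.get?_insert_self]
    · have hk' : k ∈ P.map (fun p => p.1) := by
        simp only [List.map_cons, List.mem_cons] at hk
        tauto
      rw [ih _ k hnd.2 hk']
      have : (d.insert p.1 (G p.1 (d.getD p.1 z))).getD k z = d.getD k z := by
        unfold PySem.Dict.getD
        rw [PySem.Dict.get?_insert_of_ne _ _ he]
      rw [this]

/-- Two association lists with the same (duplicate-free) key sequence and the same lookups
are equal. -/
theorem pvItems_ext {ν : Type} :
    ∀ (A B : List (String × ν)), A.map (fun p => p.1) = B.map (fun p => p.1) →
    (A.map (fun p => p.1)).Nodup →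
    (∀ k, (PySem.Dict.mk A).get? k = (PySem.Dict.mk B).get? k) → A = B := by
  intro A
  induction A with
  | nil =>
    intro B hk _ _
    cases B with
    | nil => rfl
    | cons b B => simp at hk
  | cons a A ih =>
    intro B hk hnd hg
    cases B with
    | nil => simp at hk
    | cons b B =>
      simp only [List.map_cons, List.cons.injEq] at hk
      simp only [List.map_cons, List.nodup_cons] at hnd
      have hab : a.2 = b.2 := by
        have := hg a.1
        simp [PySem.Dict.get?, List.find?_cons, ← hk.1] at this
        exact this
      have htail : A = B := by
        refine ih B hk.2 hnd.2 ?_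
        intro k
        by_cases he : k = a.1
        · have h1 : (PySem.Dict.mk A).get? k = none :=
            pvMk_get?_none A k (by rw [he]; exact hnd.1)
          have h2 : (PySem.Dict.mk B).get? k = none :=
            pvMk_get?_none B k (by rw [he, ← hk.2]; exact hnd.1)
          rw [h1, h2]
        · have := hg k
          have hb1 : (a.1 == k) = false := by
            simp only [beq_eq_false_iff_ne, ne_eq]
            exact fun hh => he hh.symm
          have hb2 : (b.1 == k) = false := by rw [← hk.1]; exact hb1
          simpa [PySem.Dict.get?, List.find?_cons, hb1, hb2] using this
      have hfst : a.1 = b.1 := hk.1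
      calc a :: A = (a.1, a.2) :: A := by rfl
        _ = (b.1, b.2) :: B := by rw [hfst, hab, htail]
        _ = b :: B := by rfl

theorem pvSet_update_subset {α : Type} [BEq α] [LawfulBEq α] (s : PySem.Set α) (l : List α)
    (h : ∀ x ∈ l, x ∈ s) : PySem.Set.update s l = s := by
  induction l generalizing s with
  | nil => rfl
  | cons x l ih =>
    have hx : PySem.Set.add s x = s := by
      unfold PySem.Set.add
      rw [if_pos]
      simp [PySem.Set.contains, List.contains_iff_mem]
      exact h x (by simp)
    show PySem.Set.update (PySem.Set.add s x) l = s
    rw [hx]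
    exact ih s (fun y hy => h y (by simp [hy]))

theorem pvBuildInner (nts : PySem.Set String) (p1 : String) (l : List (List String)) :
    ∀ (st : PySem.Dict String (PySem.Set (List String)) × PySem.Dict String (PySem.Set String))
      (s1 : PySem.Set (List String)) (s2 : PySem.Set String),
    st.1.get? p1 = some s1 → st.2.get? p1 = some s2 →
    ((l.foldl (fun st rhs =>
        if pvB_isUnit nts rhs then
          (st.1, st.2.modify p1 PySem.Set.empty (fun s => PySem.Set.add s (PySem.List.pyGetD rhs 0 "")))
        else
          (st.1.modify p1 PySem.Set.empty (fun s => PySem.Set.add s rhs), st.2)) st).1.get? p1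
        = some (PySem.Set.update s1 (l.filter (fun rhs => !pvB_isUnit nts rhs)))
    ∧ (l.foldl (fun st rhs =>
        if pvB_isUnit nts rhs then
          (st.1, st.2.modify p1 PySem.Set.empty (fun s => PySem.Set.add s (PySem.List.pyGetD rhs 0 "")))
        else
          (st.1.modify p1 PySem.Set.empty (fun s => PySem.Set.add s rhs), st.2)) st).2.get? p1
        = some (PySem.Set.update s2 ((l.filter (pvB_isUnit nts)).map (fun rhs => PySem.List.pyGetD rhs 0 "")))) := by
  induction l with
  | nil =>
    intro st s1 s2 h1 h2
    exact ⟨by simpa [PySem.Set.update] using h1, by simpa [PySem.Set.update] using h2⟩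
  | cons rhs l ih =>
    intro st s1 s2 h1 h2
    cases hc : pvB_isUnit nts rhs with
    | true =>
      have hg2 : st.2.getD p1 PySem.Set.empty = s2 := by unfold PySem.Dict.getD; rw [h2]; rfl
      have h2' : (st.2.modify p1 PySem.Set.empty
          (fun s => PySem.Set.add s (PySem.List.pyGetD rhs 0 ""))).get? p1
          = some (PySem.Set.add s2 (PySem.List.pyGetD rhs 0 "")) := by
        unfold PySem.Dict.modify
        rw [hg2, PySem.Dict.get?_insert_self]
      have := ih (st.1, st.2.modify p1 PySem.Set.empty
          (fun s => PySem.Set.add s (PySem.List.pyGetD rhs 0 ""))) s1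
          (PySem.Set.add s2 (PySem.List.pyGetD rhs 0 "")) h1 h2'
      simpa [hc, List.filter_cons, PySem.Set.update] using this
    | false =>
      have hg1 : st.1.getD p1 PySem.Set.empty = s1 := by unfold PySem.Dict.getD; rw [h1]; rfl
      have h1' : (st.1.modify p1 PySem.Set.empty (fun s => PySem.Set.add s rhs)).get? p1
          = some (PySem.Set.add s1 rhs) := by
        unfold PySem.Dict.modify
        rw [hg1, PySem.Dict.get?_insert_self]
      have := ih (st.1.modify p1 PySem.Set.empty (fun s => PySem.Set.add s rhs), st.2)
          (PySem.Set.add s1 rhs) s2 h1' h2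
      simpa [hc, List.filter_cons, PySem.Set.update] using this

theorem pvBuildInner_ne (nts : PySem.Set String) (p1 : String) (l : List (List String)) :
    ∀ (st : PySem.Dict String (PySem.Set (List String)) × PySem.Dict String (PySem.Set String))
      (x : String), x ≠ p1 →
    ((l.foldl (fun st rhs =>
        if pvB_isUnit nts rhs then
          (st.1, st.2.modify p1 PySem.Set.empty (fun s => PySem.Set.add s (PySem.List.pyGetD rhs 0 "")))
        else
          (st.1.modify p1 PySem.Set.empty (fun s => PySem.Set.add s rhs), st.2)) st).1.get? x
        = st.1.get? x
    ∧ (l.foldl (fun st rhs =>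
        if pvB_isUnit nts rhs then
          (st.1, st.2.modify p1 PySem.Set.empty (fun s => PySem.Set.add s (PySem.List.pyGetD rhs 0 "")))
        else
          (st.1.modify p1 PySem.Set.empty (fun s => PySem.Set.add s rhs), st.2)) st).2.get? x
        = st.2.get? x) := by
  induction l with
  | nil => intro st x _; exact ⟨rfl, rfl⟩
  | cons rhs l ih =>
    intro st x hx
    cases hc : pvB_isUnit nts rhs with
    | true =>
      have := ih (st.1, st.2.modify p1 PySem.Set.empty
          (fun s => PySem.Set.add s (PySem.List.pyGetD rhs 0 ""))) x hx
      have hkeep : (st.2.modify p1 PySem.Set.empty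
          (fun s => PySem.Set.add s (PySem.List.pyGetD rhs 0 ""))).get? x = st.2.get? x := by
        unfold PySem.Dict.modify
        exact PySem.Dict.get?_insert_of_ne _ _ hx
      simp only [List.foldl_cons, hc, if_true]
      exact ⟨this.1, by rw [this.2, hkeep]⟩
    | false =>
      have := ih (st.1.modify p1 PySem.Set.empty (fun s => PySem.Set.add s rhs), st.2) x hx
      have hkeep : (st.1.modify p1 PySem.Set.empty (fun s => PySem.Set.add s rhs)).get? x
          = st.1.get? x := by
        unfold PySem.Dict.modify
        exact PySem.Dict.get?_insert_of_ne _ _ hx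
      simp only [List.foldl_cons, hc, if_false, Bool.false_eq_true]
      exact ⟨by rw [this.1, hkeep], this.2⟩

theorem pvBuildOuter_ne (nts : PySem.Set String) (Q : List (String × List (List String))) :
    ∀ (st : PySem.Dict String (PySem.Set (List String)) × PySem.Dict String (PySem.Set String))
      (k : String), ¬ k ∈ Q.map (fun p => p.1) →
    ((Q.foldl (fun st p =>
        p.2.foldl (fun st rhs =>
          if pvB_isUnit nts rhs then
            (st.1, st.2.modify p.1 PySem.Set.empty (fun s => PySem.Set.add s (PySem.List.pyGetD rhs 0 "")))
          else
            (st.1.modify p.1 PySem.Set.empty (fun s => PySem.Set.add s rhs), st.2)) st) st).1.get? k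
        = st.1.get? k
    ∧ (Q.foldl (fun st p =>
        p.2.foldl (fun st rhs =>
          if pvB_isUnit nts rhs then
            (st.1, st.2.modify p.1 PySem.Set.empty (fun s => PySem.Set.add s (PySem.List.pyGetD rhs 0 "")))
          else
            (st.1.modify p.1 PySem.Set.empty (fun s => PySem.Set.add s rhs), st.2)) st) st).2.get? k
        = st.2.get? k) := by
  induction Q with
  | nil => intro st k _; exact ⟨rfl, rfl⟩
  | cons p Q ih =>
    intro st k hk
    simp only [List.map_cons, List.mem_cons] at hk
    push_neg at hk
    have hstep := pvBuildInner_ne nts p.1 p.2 st k hk.1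
    have hrest := ih (p.2.foldl (fun st rhs =>
          if pvB_isUnit nts rhs then
            (st.1, st.2.modify p.1 PySem.Set.empty (fun s => PySem.Set.add s (PySem.List.pyGetD rhs 0 "")))
          else
            (st.1.modify p.1 PySem.Set.empty (fun s => PySem.Set.add s rhs), st.2)) st) k hk.2
    simp only [List.foldl_cons]
    exact ⟨by rw [hrest.1, hstep.1], by rw [hrest.2, hstep.2]⟩

theorem pvBuildOuter (nts : PySem.Set String) (Q : List (String × List (List String))) :
    ∀ (st : PySem.Dict String (PySem.Set (List String)) × PySem.Dict String (PySem.Set String))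
      (k : String), (Q.map (fun p => p.1)).Nodup → k ∈ Q.map (fun p => p.1) →
    st.1.get? k = some PySem.Set.empty → st.2.get? k = some PySem.Set.empty →
    ((Q.foldl (fun st p =>
        p.2.foldl (fun st rhs =>
          if pvB_isUnit nts rhs then
            (st.1, st.2.modify p.1 PySem.Set.empty (fun s => PySem.Set.add s (PySem.List.pyGetD rhs 0 "")))
          else
            (st.1.modify p.1 PySem.Set.empty (fun s => PySem.Set.add s rhs), st.2)) st) st).1.get? k
        = some (PySem.Set.ofList (((PySem.Dict.mk Q).getD k []).filter (fun rhs => !pvB_isUnit nts rhs)))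
    ∧ (Q.foldl (fun st p =>
        p.2.foldl (fun st rhs =>
          if pvB_isUnit nts rhs then
            (st.1, st.2.modify p.1 PySem.Set.empty (fun s => PySem.Set.add s (PySem.List.pyGetD rhs 0 "")))
          else
            (st.1.modify p.1 PySem.Set.empty (fun s => PySem.Set.add s rhs), st.2)) st) st).2.get? k
        = some (PySem.Set.ofList ((((PySem.Dict.mk Q).getD k []).filter (pvB_isUnit nts)).map
            (fun rhs => PySem.List.pyGetD rhs 0 "")))) := by
  induction Q with
  | nil => intro st k _ hk; simp at hk
  | cons p Q ih =>
    intro st k hnd hk h1 h2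
    simp only [List.map_cons, List.nodup_cons] at hnd
    simp only [List.foldl_cons]
    by_cases he : k = p.1
    · subst he
      have hlk : (PySem.Dict.mk (p :: Q)).getD p.1 [] = p.2 := by
        unfold PySem.Dict.getD PySem.Dict.get?
        simp [List.find?_cons]
      have hstep := pvBuildInner nts p.1 p.2 st PySem.Set.empty PySem.Set.empty h1 h2
      have hrest := pvBuildOuter_ne nts Q
        (p.2.foldl (fun st rhs =>
          if pvB_isUnit nts rhs then
            (st.1, st.2.modify p.1 PySem.Set.empty (fun s => PySem.Set.add s (PySem.List.pyGetD rhs 0 "")))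
          else
            (st.1.modify p.1 PySem.Set.empty (fun s => PySem.Set.add s rhs), st.2)) st) p.1 hnd.1
      rw [hlk]
      exact ⟨by rw [hrest.1, hstep.1]; rfl, by rw [hrest.2, hstep.2]; rfl⟩
    · have hk' : k ∈ Q.map (fun p => p.1) := by
        simp only [List.map_cons, List.mem_cons] at hk
        tauto
      have hlk : (PySem.Dict.mk (p :: Q)).getD k [] = (PySem.Dict.mk Q).getD k [] := by
        unfold PySem.Dict.getD PySem.Dict.get?
        have hb : (p.1 == k) = false := by
          simp only [beq_eq_false_iff_ne, ne_eq]
          exact fun hh => he hh.symm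
        simp [List.find?_cons, hb]
      have hstep := pvBuildInner_ne nts p.1 p.2 st k he
      have := ih (p.2.foldl (fun st rhs =>
          if pvB_isUnit nts rhs then
            (st.1, st.2.modify p.1 PySem.Set.empty (fun s => PySem.Set.add s (PySem.List.pyGetD rhs 0 "")))
          else
            (st.1.modify p.1 PySem.Set.empty (fun s => PySem.Set.add s rhs), st.2)) st) k hnd.2 hk'
          (by rw [hstep.1]; exact h1) (by rw [hstep.2]; exact h2)
      rw [hlk]
      exact this

theorem pvMk_get?_isSome {ν : Type} (P : List (String × ν)) (k : String)
    (h : k ∈ P.map (fun p => p.1)) : ∃ l, (PySem.Dict.mk P).get? k = some l := by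
  unfold PySem.Dict.get?
  rcases List.mem_map.mp h with ⟨p, hp, he⟩
  have : ((P.find? (fun p => p.1 == k)).isSome) = true :=
    List.find?_isSome.mpr ⟨p, hp, by simp [he]⟩
  rcases Option.isSome_iff_exists.mp this with ⟨q, hq⟩
  exact ⟨q.2, by rw [hq]; rfl⟩

theorem pvA_build_getD (nts : PySem.Set String) (P : List (String × List (List String)))
    (hnd : (P.map (fun p => p.1)).Nodup) (k : String) :
    (pvA_build nts P).1.getD k PySem.Set.empty = pvNUf nts P k ∧
    (pvA_build nts P).2.getD k PySem.Set.empty = pvUGf nts P k := by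
  have hbody : pvA_build nts P
      = P.foldl (fun st p =>
          p.2.foldl (fun st rhs =>
            if pvB_isUnit nts rhs then
              (st.1, st.2.modify p.1 PySem.Set.empty (fun s => PySem.Set.add s (PySem.List.pyGetD rhs 0 "")))
            else
              (st.1.modify p.1 PySem.Set.empty (fun s => PySem.Set.add s rhs), st.2)) st)
          (P.foldl (fun d p => d.insert p.1 PySem.Set.empty) (PySem.Dict.mk []),
           P.foldl (fun d p => d.insert p.1 PySem.Set.empty) (PySem.Dict.mk [])) := rfl
  rw [hbody]
  by_cases hk : k ∈ P.map (fun p => p.1)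
  · have h1 : (P.foldl (fun d p => d.insert p.1 PySem.Set.empty)
        (PySem.Dict.mk ([] : List (String × PySem.Set (List String))))).get? k
        = some PySem.Set.empty := by
      rw [pvFoldInsC_get?]; simp [hk]
    have h2 : (P.foldl (fun d p => d.insert p.1 PySem.Set.empty)
        (PySem.Dict.mk ([] : List (String × PySem.Set String)))).get? k
        = some PySem.Set.empty := by
      rw [pvFoldInsC_get?]; simp [hk]
    have := pvBuildOuter nts P
      (P.foldl (fun d p => d.insert p.1 PySem.Set.empty) (PySem.Dict.mk []),
       P.foldl (fun d p => d.insert p.1 PySem.Set.empty) (PySem.Dict.mk []))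
      k hnd hk h1 h2
    constructor
    · show ((_ : PySem.Dict String (PySem.Set (List String))).get? k).getD PySem.Set.empty = _
      rw [this.1]
      rfl
    · show ((_ : PySem.Dict String (PySem.Set String)).get? k).getD PySem.Set.empty = _
      rw [this.2]
      rfl
  · have hne := pvBuildOuter_ne nts P
      (P.foldl (fun d p => d.insert p.1 PySem.Set.empty) (PySem.Dict.mk []),
       P.foldl (fun d p => d.insert p.1 PySem.Set.empty) (PySem.Dict.mk [])) k hk
    have hlk : pvLk P k = [] := by
      unfold pvLk
      show ((PySem.Dict.mk P).get? k).getD [] = []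
      rw [pvMk_get?_none P k hk]
      rfl
    constructor
    · show ((_ : PySem.Dict String (PySem.Set (List String))).get? k).getD PySem.Set.empty = _
      rw [hne.1, pvFoldInsC_get?, if_neg hk]
      unfold pvNUf
      rw [hlk]
      rfl
    · show ((_ : PySem.Dict String (PySem.Set String)).get? k).getD PySem.Set.empty = _
      rw [hne.2, pvFoldInsC_get?, if_neg hk]
      unfold pvUGf
      rw [hlk]
      rfl

theorem pvB_nu_getD (nts : PySem.Set String) (P : List (String × List (List String))) (k : String) :
    (PySem.Dict.mk (P.map (fun p =>
        (p.1, PySem.Set.ofList (p.2.filter (fun rhs => !pvB_isUnit nts rhs)))))).getD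
        k PySem.Set.empty
      = pvNUf nts P k := by
  unfold PySem.Dict.getD
  rw [pvMap_get? P (fun _ l => PySem.Set.ofList (l.filter (fun rhs => !pvB_isUnit nts rhs))) k]
  unfold pvNUf pvLk PySem.Dict.getD
  cases h : (PySem.Dict.mk P).get? k with
  | none => simp [h]
  | some l => simp [h]

theorem pvB_ug_getD (nts : PySem.Set String) (P : List (String × List (List String))) (k : String) :
    (PySem.Dict.mk (P.map (fun p =>
        (p.1, PySem.Set.ofList ((p.2.filter (pvB_isUnit nts)).map
          (fun rhs => PySem.List.pyGetD rhs 0 "")))))).getD k PySem.Set.empty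
      = pvUGf nts P k := by
  unfold PySem.Dict.getD
  rw [pvMap_get? P (fun _ l => PySem.Set.ofList ((l.filter (pvB_isUnit nts)).map
    (fun rhs => PySem.List.pyGetD rhs 0 ""))) k]
  unfold pvUGf pvLk PySem.Dict.getD
  cases h : (PySem.Dict.mk P).get? k with
  | none => simp [h]
  | some l => simp [h]

/-- A's two result-building folds, assembled: if every per-origin BFS value equals `Bval`,
A's items list is the map of `Bval` over the keys. -/
theorem pvAssemble (P : List (String × List (List String)))
    (hnd : (P.map (fun p => p.1)).Nodup)
    (NU : PySem.Dict String (PySem.Set (List String)))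
    (UG : PySem.Dict String (PySem.Set String))
    (Bval : String → PySem.Set (List String))
    (hval : ∀ k, pvA_bfs UG NU (UG.getD k PySem.Set.empty)
        (PySem.Set.ofList (UG.getD k PySem.Set.empty))
        (PySem.Set.ofList (NU.getD k PySem.Set.empty)) = Bval k) :
    (P.foldl (fun d p => d.insert p.1
        (pvA_bfs UG NU (UG.getD p.1 PySem.Set.empty)
          (PySem.Set.ofList (UG.getD p.1 PySem.Set.empty)) (d.getD p.1 PySem.Set.empty)))
      (P.foldl (fun d p => d.insert p.1 (PySem.Set.ofList (NU.getD p.1 PySem.Set.empty)))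
        (PySem.Dict.mk []))).items
    = P.map (fun p => (p.1, Bval p.1)) := by
  have hkeys : (P.foldl (fun d p => d.insert p.1
        (pvA_bfs UG NU (UG.getD p.1 PySem.Set.empty)
          (PySem.Set.ofList (UG.getD p.1 PySem.Set.empty)) (d.getD p.1 PySem.Set.empty)))
      (P.foldl (fun d p => d.insert p.1 (PySem.Set.ofList (NU.getD p.1 PySem.Set.empty)))
        (PySem.Dict.mk []))).items.map (fun p => p.1) = P.map (fun p => p.1) := by
    have k0 : (P.foldl (fun d p => d.insert p.1 (PySem.Set.ofList (NU.getD p.1 PySem.Set.empty)))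
        (PySem.Dict.mk ([] : List (String × PySem.Set (List String))))).keys
        = P.map (fun p => p.1) := by
      rw [PySem.Dict.keys_foldl_insert_key]
      show PySem.Set.update (PySem.Set.empty) _ = _
      show PySem.Set.ofList _ = _
      exact PySem.Set.ofList_eq_self_of_nodup _ hnd
    show (PySem.Dict.keys _) = _
    rw [PySem.Dict.keys_foldl_insert_key, k0]
    exact pvSet_update_subset _ _ (fun x hx => hx)
  refine pvItems_ext _ _ ?_ ?_ ?_
  · rw [hkeys, List.map_map]
    rfl
  · rw [hkeys]; exact hnd
  · intro k
    rw [pvMap_get? P (fun k _ => Bval k) k]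
    by_cases hk : k ∈ P.map (fun p => p.1)
    · have h0 := pvFoldIns_get? (fun k _ => PySem.Set.ofList (NU.getD k PySem.Set.empty))
        PySem.Set.empty P (PySem.Dict.mk []) k hnd hk
      have h1 := pvFoldIns_get? (fun k v => pvA_bfs UG NU (UG.getD k PySem.Set.empty)
          (PySem.Set.ofList (UG.getD k PySem.Set.empty)) v)
        PySem.Set.empty P
        (P.foldl (fun d p => d.insert p.1 (PySem.Set.ofList (NU.getD p.1 PySem.Set.empty)))
          (PySem.Dict.mk [])) k hnd hk
      beta_reduce at h0 h1
      rw [h1]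
      have hr0 : (P.foldl (fun d p => d.insert p.1 (PySem.Set.ofList (NU.getD p.1 PySem.Set.empty)))
          (PySem.Dict.mk ([] : List (String × PySem.Set (List String))))).getD k PySem.Set.empty
          = PySem.Set.ofList (NU.getD k PySem.Set.empty) := by
        show ((_ : PySem.Dict String (PySem.Set (List String))).get? k).getD PySem.Set.empty = _
        rw [h0]
        rfl
      rw [hr0]
      rcases pvMk_get?_isSome P k hk with ⟨l, hl⟩
      rw [hl]
      simp only [Option.map_some]
      rw [hval k]
    · have h1 := pvFoldIns_get?_notmem (fun k v => pvA_bfs UG NU (UG.getD k PySem.Set.empty)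
          (PySem.Set.ofList (UG.getD k PySem.Set.empty)) v)
        PySem.Set.empty P
        (P.foldl (fun d p => d.insert p.1 (PySem.Set.ofList (NU.getD p.1 PySem.Set.empty)))
          (PySem.Dict.mk [])) k hk
      have h0 := pvFoldIns_get?_notmem (fun k _ => PySem.Set.ofList (NU.getD k PySem.Set.empty))
        PySem.Set.empty P (PySem.Dict.mk []) k hk
      beta_reduce at h0 h1
      rw [h1, h0, pvMk_get?_none P k hk]
      rfl

set_option maxHeartbeats 2000000 in
theorem pvMain (P : List (String × List (List String)))
    (hnd : (P.map (fun p => p.1)).Nodup) :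
    eliminate_unit_productions_py P = eliminate_unit_productions_py_alt P := by
  have hNU := fun t => (pvA_build_getD (PySem.Set.ofList (P.map (fun p => p.1))) P hnd t).1
  have hUG := fun t => (pvA_build_getD (PySem.Set.ofList (P.map (fun p => p.1))) P hnd t).2
  have hNUB := pvB_nu_getD (PySem.Set.ofList (P.map (fun p => p.1))) P
  have hUGB := pvB_ug_getD (PySem.Set.ofList (P.map (fun p => p.1))) P
  have hval : ∀ k,
      pvA_bfs (pvA_build (PySem.Set.ofList (P.map (fun p => p.1))) P).2
        (pvA_build (PySem.Set.ofList (P.map (fun p => p.1))) P).1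
        ((pvA_build (PySem.Set.ofList (P.map (fun p => p.1))) P).2.getD k PySem.Set.empty)
        (PySem.Set.ofList ((pvA_build (PySem.Set.ofList (P.map (fun p => p.1))) P).2.getD k PySem.Set.empty))
        (PySem.Set.ofList ((pvA_build (PySem.Set.ofList (P.map (fun p => p.1))) P).1.getD k PySem.Set.empty))
      = PySem.Set.union
          ((PySem.Dict.mk (P.map (fun p =>
            (p.1, PySem.Set.ofList (p.2.filter (fun rhs =>
              !pvB_isUnit (PySem.Set.ofList (P.map (fun p => p.1))) rhs)))))).getD k PySem.Set.empty)
          ((pvSat (PySem.Dict.mk (P.map (fun p =>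
              (p.1, PySem.Set.ofList ((p.2.filter (pvB_isUnit (PySem.Set.ofList (P.map (fun p => p.1))))).map
                (fun rhs => PySem.List.pyGetD rhs 0 ""))))))
            P.length
            (PySem.Set.ofList ((PySem.Dict.mk (P.map (fun p =>
              (p.1, PySem.Set.ofList ((p.2.filter (pvB_isUnit (PySem.Set.ofList (P.map (fun p => p.1))))).map
                (fun rhs => PySem.List.pyGetD rhs 0 "")))))).getD k PySem.Set.empty))).flatMap
            (fun t => (PySem.Dict.mk (P.map (fun p =>
              (p.1, PySem.Set.ofList (p.2.filter (fun rhs =>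
                !pvB_isUnit (PySem.Set.ofList (P.map (fun p => p.1))) rhs)))))).getD t PySem.Set.empty)) := by
    intro k
    have hfunA : (fun t => (pvA_build (PySem.Set.ofList (P.map (fun p => p.1))) P).1.getD t PySem.Set.empty)
        = pvNUf (PySem.Set.ofList (P.map (fun p => p.1))) P := funext hNU
    have hfunB : (fun t => (PySem.Dict.mk (P.map (fun p =>
          (p.1, PySem.Set.ofList (p.2.filter (fun rhs =>
            !pvB_isUnit (PySem.Set.ofList (P.map (fun p => p.1))) rhs)))))).getD t PySem.Set.empty)
        = pvNUf (PySem.Set.ofList (P.map (fun p => p.1))) P := funext hNUB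
    have hugnd : (pvUGf (PySem.Set.ofList (P.map (fun p => p.1))) P k).Nodup := by
      unfold pvUGf; exact PySem.Set.nodup_ofList _
    have hnund : (pvNUf (PySem.Set.ofList (P.map (fun p => p.1))) P k).Nodup := by
      unfold pvNUf; exact PySem.Set.nodup_ofList _
    have hsat : pvSat (PySem.Dict.mk (P.map (fun p =>
          (p.1, PySem.Set.ofList ((p.2.filter (pvB_isUnit (PySem.Set.ofList (P.map (fun p => p.1))))).map
            (fun rhs => PySem.List.pyGetD rhs 0 ""))))))
          P.length (pvUGf (PySem.Set.ofList (P.map (fun p => p.1))) P k)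
        = pvAvis (PySem.Dict.mk (P.map (fun p =>
          (p.1, PySem.Set.ofList ((p.2.filter (pvB_isUnit (PySem.Set.ofList (P.map (fun p => p.1))))).map
            (fun rhs => PySem.List.pyGetD rhs 0 ""))))))
          (pvUGf (PySem.Set.ofList (P.map (fun p => p.1))) P k)
          (pvUGf (PySem.Set.ofList (P.map (fun p => p.1))) P k) := by
      have h := pvSat_eq_avis (PySem.Dict.mk (P.map (fun p =>
          (p.1, PySem.Set.ofList ((p.2.filter (pvB_isUnit (PySem.Set.ofList (P.map (fun p => p.1))))).map
            (fun rhs => PySem.List.pyGetD rhs 0 ""))))))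
          P.length [] (pvUGf (PySem.Set.ofList (P.map (fun p => p.1))) P k)
          (by simpa using pvFilter_bound _ P _ (pvUB_subset P))
          (by simpa using hugnd)
          (by intro t ht; simp at ht)
      simpa using h
    rw [pvA_bfs_eq, hfunA, hNU k, hUG k, hNUB k, hUGB k,
      PySem.Set.ofList_eq_self_of_nodup _ hugnd,
      PySem.Set.ofList_eq_self_of_nodup _ hnund,
      hsat, hfunB,
      pvAvis_congr _ _ _ _ (fun t => ((hUGB t).trans (hUG t).symm))]
    rfl
  exact pvAssemble P hnd _ _ _ hval

-- ===== VERDICT (by name: the statement is the Claim_ definition above) =====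
theorem eliminate_unit_productions_py_spec : Claim_equal_eliminate_unit_productions_py := by
  intro P _ hpre
  exact pvMain P hpre
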